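-- pv_equiv track=rewrite | github.com/saik2017/Coding | python_learning/6.00.1x/random codes/poly.py | standard
-- ===== SOURCE A (Python) =====
-- def standard(a,prime):
--     """
--     converts the tuple form of a(x) into a standard form under mod prime
--     with leading  coefficient not equal to zero
--     """
--     b=list(a)
--     l=len(b)
--     if l==0:
--         return (0,)
--     r=[]
--     for i in range(l-1,-1,-1):
--         if b[i]%prime!=0:
--             break
--     for j in range(i+1):
--         temp=b[j]%prime
--         r.append(temp)
--
--
--     r=tuple(r)
--
--     return r
-- ===== SOURCE B (Python) =====
-- def standard(a, prime):
--     """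
--     converts the tuple form of a(x) into a standard form under mod prime
--     with leading coefficient not equal to zero
--     """
--     if not a:
--         return (0,)
--     c = [x % prime for x in a]
--     while len(c) > 1 and c[-1] == 0:
--         c.pop()
--     return tuple(c)
-- ===== Notes on version B (the rewrite author's own statement) =====
-- stated objective: simpler
-- what changed: B reduces every coefficient mod prime first and then trims trailing zeros by popping from the end (keeping one element), instead of A's backward index break-scan to find the last non-zero coefficient followed by a forward prefix-reduction loop.
import Mathlib
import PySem

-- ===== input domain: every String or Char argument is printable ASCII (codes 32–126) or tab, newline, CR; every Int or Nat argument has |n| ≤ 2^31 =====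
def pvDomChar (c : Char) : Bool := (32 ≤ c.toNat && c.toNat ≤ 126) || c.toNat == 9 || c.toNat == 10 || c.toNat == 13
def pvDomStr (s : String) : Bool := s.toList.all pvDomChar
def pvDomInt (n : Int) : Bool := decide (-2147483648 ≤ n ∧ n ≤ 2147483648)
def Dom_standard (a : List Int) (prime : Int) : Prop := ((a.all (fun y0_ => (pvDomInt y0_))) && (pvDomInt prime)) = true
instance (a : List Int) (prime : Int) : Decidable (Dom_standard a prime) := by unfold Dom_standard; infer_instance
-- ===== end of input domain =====

-- B reduces all coefficients mod prime first, then trims trailing zeros from the end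
-- (keeping one element), instead of A's backward break-scan then prefix-reduction; objective: simpler.


-- ===== PORT A =====
-- 'for i in range(l-1,-1,-1): if b[i]%prime!=0: break' — i ends as the break index,
-- or as the last range value (0) if the loop runs out; the range is nonempty (l ≥ 1),
-- so the [] case below is unreachable.
def standardBreak (b : List Int) (prime : Int) : List Int → Int
  | [] => 0
  | [i] => i
  | i :: i' :: rest =>
      if PySem.Int.mod (PySem.List.pyGetD b i 0) prime ≠ 0 then i
      else standardBreak b prime (i' :: rest)

def standard (a : List Int) (prime : Int) : List Int :=
  let b := a
  let l : Int := b.length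
  if l = 0 then [0]
  else
    let i := standardBreak b prime (PySem.List.pyRange (l - 1) (-1) (-1))
    -- 'for j in range(i+1): r.append(b[j]%prime)'
    (PySem.List.pyRange 0 (i + 1) 1).foldl
      (fun r j => r ++ [PySem.Int.mod (PySem.List.pyGetD b j 0) prime]) []

-- ===== PORT B =====
-- 'while len(c) > 1 and c[-1] == 0: c.pop()'
def standardTrim (c : List Int) : List Int :=
  if 1 < c.length ∧ c.getLast? = some 0 then standardTrim c.dropLast else c
termination_by c.length
decreasing_by simp_all [List.length_dropLast]; omega

def standard_alt (a : List Int) (prime : Int) : List Int :=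
  if a = [] then [0]
  else standardTrim (a.map (fun x => PySem.Int.mod x prime))

-- ===== PRECONDITION & SPEC =====
-- prime = 0 makes Python's '%' raise ZeroDivisionError in both A and B, except on the
-- empty tuple, which both return (0,) for before any division.
def Pre_standard (a : List Int) (prime : Int) : Prop := a = [] ∨ prime ≠ 0
instance (a : List Int) (prime : Int) : Decidable (Pre_standard a prime) := by unfold Pre_standard; infer_instance
def pvWitness_standard : List Int × Int := ([3, 7, 5, 10], 5)

def Spec_standard (a : List Int) (prime : Int) (out : List Int) : Prop := out = standard_alt a prime
instance (a : List Int) (prime : Int) (out : List Int) : Decidable (Spec_standard a prime out) := by unfold Spec_standard; infer_instance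

-- ===== CLAIM (what is proved, stated in full; the proofs are below) =====
def Claim_equal_standard : Prop := ∀ (a : List Int) (prime : Int), Dom_standard a prime → Pre_standard a prime → Spec_standard a prime (standard a prime)

-- ===== LEMMAS AND PROOFS =====

-- standardBreak only reads b at indices occurring in the scanned range list
theorem standardBreak_congr (b₁ b₂ : List Int) (p : Int) (L : List Int)
    (h : ∀ i ∈ L, PySem.List.pyGetD b₁ i 0 = PySem.List.pyGetD b₂ i 0) :
    standardBreak b₁ p L = standardBreak b₂ p L := by
  induction L with
  | nil => rfl
  | cons i rest ih =>
    cases rest with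
    | nil => rfl
    | cons i' rest' =>
      simp only [standardBreak, h i (by simp)]
      split
      · rfl
      · exact ih (fun j hj => h j (List.mem_cons_of_mem _ hj))

theorem standardBreak_mem (b : List Int) (p : Int) :
    ∀ (L : List Int), L ≠ [] → standardBreak b p L ∈ L := by
  intro L
  induction L with
  | nil => intro h; simp at h
  | cons i rest ih =>
    intro _
    cases rest with
    | nil => simp [standardBreak]
    | cons i' rest' =>
      simp only [standardBreak]
      split
      · simp
      · exact List.mem_cons_of_mem _ (ih (by simp))

theorem pyGetD_append_left (ys zs : List Int) (i : Int) (h0 : 0 ≤ i) (h : i < ys.length) :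
    PySem.List.pyGetD (ys ++ zs) i 0 = PySem.List.pyGetD ys i 0 := by
  rw [PySem.List.pyGetD_of_nonneg _ _ h0, PySem.List.pyGetD_of_nonneg _ _ h0]
  rw [List.getD, List.getD, List.getElem?_append_left (by omega)]

-- unfold one step of the trim loop at an appended zero
theorem standardTrim_append_zero (c : List Int) (hc : c ≠ []) :
    standardTrim (c ++ [0]) = standardTrim c := by
  rw [standardTrim]
  simp [List.length_pos_iff.mpr hc]

theorem standardTrim_last_ne (c : List Int) (z : Int) (hz : z ≠ 0) :
    standardTrim (c ++ [z]) = c ++ [z] := by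
  rw [standardTrim]
  simp [hz]

-- the singleton case of A: a = [z] gives [z % prime]
theorem standard_singleton (z prime : Int) :
    standard [z] prime = [PySem.Int.mod z prime] := by
  simp only [standard]
  rw [if_neg (by simp)]
  have h1 : PySem.List.pyRange (((1:Nat):Int) - 1) (-1) (-1) = [0] := by
    norm_num
    rw [PySem.List.pyRange_neg_one_cons (by omega), PySem.List.pyRange_neg_one_eq_nil (by omega)]
  simp only [List.length_cons, List.length_nil, h1]
  simp only [standardBreak]
  rw [PySem.List.pyRange_one_singleton]
  simp [PySem.List.pyGetD_of_nonneg, List.getD]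

theorem standard_eq_alt (a : List Int) (prime : Int) :
    standard a prime = standard_alt a prime := by
  induction a using List.reverseRecOn with
  | nil => simp [standard, standard_alt]
  | append_singleton ys z ih =>
    rcases eq_or_ne ys [] with hys | hys
    · subst hys
      rw [List.nil_append, standard_singleton]
      simp only [standard_alt]
      rw [if_neg (by simp), List.map_singleton, standardTrim]
      simp
    · -- ys ≠ []
      have hne : ys ++ [z] ≠ [] := by simp
      have hlen : ((ys ++ [z]).length : Int) = (ys.length : Int) + 1 := by simp
      have hyslpos : 0 < (ys.length : Int) := by
        have := List.length_pos_iff.mpr hys; omega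
      simp only [standard, standard_alt, if_neg hne]
      rw [if_neg (by omega)]
      have hrange : PySem.List.pyRange (((ys ++ [z]).length : Int) - 1) (-1) (-1) =
          ((ys.length : Int)) :: PySem.List.pyRange ((ys.length : Int) - 1) (-1) (-1) := by
        rw [hlen]
        have := PySem.List.pyRange_neg_one_cons (a := (ys.length : Int)) (b := -1) (by omega)
        simpa using this
      have hgetz : PySem.List.pyGetD (ys ++ [z]) (ys.length : Int) 0 = z := by
        rw [PySem.List.pyGetD_of_nonneg _ _ (by omega)]
        simp [List.getD]
      have hL : PySem.List.pyRange ((ys.length : Int) - 1) (-1) (-1) ≠ [] := by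
        rw [PySem.List.pyRange_neg_one_cons (by omega)]
        simp
      rw [hrange]
      by_cases hz : PySem.Int.mod z prime = 0
      · -- last coefficient reduces to 0: A scans on into ys, B pops the 0
        have hstep : standardBreak (ys ++ [z]) prime
            ((ys.length : Int) :: PySem.List.pyRange ((ys.length : Int) - 1) (-1) (-1)) =
            standardBreak (ys ++ [z]) prime (PySem.List.pyRange ((ys.length : Int) - 1) (-1) (-1)) := by
          cases hEq : PySem.List.pyRange ((ys.length : Int) - 1) (-1) (-1) with
          | nil => exact absurd hEq hL
          | cons w ws =>
            simp only [standardBreak, hgetz]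
            rw [if_neg (by simp [hz])]
        rw [hstep]
        have hcongr : standardBreak (ys ++ [z]) prime
            (PySem.List.pyRange ((ys.length : Int) - 1) (-1) (-1)) =
            standardBreak ys prime (PySem.List.pyRange ((ys.length : Int) - 1) (-1) (-1)) := by
          apply standardBreak_congr
          intro i hi
          rw [PySem.List.mem_pyRange_neg_one] at hi
          exact pyGetD_append_left ys [z] i (by omega) (by omega)
        rw [hcongr]
        set i := standardBreak ys prime (PySem.List.pyRange ((ys.length : Int) - 1) (-1) (-1)) with hi
        have himem := standardBreak_mem ys prime _ hL
        rw [← hi, PySem.List.mem_pyRange_neg_one] at himem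
        -- the second loop only reads indices 0..i, all inside ys
        have hfold : (PySem.List.pyRange 0 (i + 1) 1).foldl
            (fun r j => r ++ [PySem.Int.mod (PySem.List.pyGetD (ys ++ [z]) j 0) prime]) [] =
            (PySem.List.pyRange 0 (i + 1) 1).foldl
            (fun r j => r ++ [PySem.Int.mod (PySem.List.pyGetD ys j 0) prime]) [] := by
          apply PySem.List.foldl_congr_mem
          intro acc j hj
          rw [PySem.List.mem_pyRange_one] at hj
          rw [pyGetD_append_left ys [z] j (by omega) (by omega)]
        rw [hfold]
        -- B side: the appended coefficient becomes 0 and the trim loop pops it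
        have hmapne : ys.map (fun x => PySem.Int.mod x prime) ≠ [] := by simp [hys]
        have hmap : (ys ++ [z]).map (fun x => PySem.Int.mod x prime) =
            ys.map (fun x => PySem.Int.mod x prime) ++ [0] := by simp [hz]
        rw [hmap, standardTrim_append_zero _ hmapne]
        -- both sides are the corresponding sides of the induction hypothesis
        have hIH := ih
        simp only [standard, standard_alt, if_neg hys] at hIH
        rw [if_neg (show ¬((ys.length : Int)) = 0 by omega)] at hIH
        exact hIH
      · -- last coefficient survives: i = l-1, A emits the whole reduced list, B trims nothing
        have hbreak : standardBreak (ys ++ [z]) prime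
            ((ys.length : Int) :: PySem.List.pyRange ((ys.length : Int) - 1) (-1) (-1)) =
            (ys.length : Int) := by
          cases hEq : PySem.List.pyRange ((ys.length : Int) - 1) (-1) (-1) with
          | nil => simp [standardBreak]
          | cons w ws =>
            simp only [standardBreak, hgetz]
            rw [if_pos hz]
        rw [hbreak]
        have hfold2 : (PySem.List.pyRange 0 ((ys.length : Int) + 1) 1).foldl
            (fun r j => r ++ [PySem.Int.mod (PySem.List.pyGetD (ys ++ [z]) j 0) prime]) [] =
            (ys ++ [z]).map (fun x => PySem.Int.mod x prime) := by
          rw [PySem.List.foldl_append_singleton_eq_map, List.nil_append, ← hlen]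
          rw [show (fun j => PySem.Int.mod (PySem.List.pyGetD (ys ++ [z]) j 0) prime) =
              (fun x => PySem.Int.mod x prime) ∘ (fun j => PySem.List.pyGetD (ys ++ [z]) j 0) from rfl]
          rw [← List.map_map, PySem.List.map_pyGetD_pyRange_zero']
        rw [hfold2]
        have hsplit : (ys ++ [z]).map (fun x => PySem.Int.mod x prime) =
            ys.map (fun x => PySem.Int.mod x prime) ++ [PySem.Int.mod z prime] := by simp
        rw [hsplit, standardTrim_last_ne _ _ hz]

-- ===== VERDICT (by name: the statement is the Claim_ definition above) =====
theorem standard_spec : Claim_equal_standard := by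
  intro a prime _ _
  unfold Spec_standard
  exact standard_eq_alt a prime
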